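-- pv_equiv track=rewrite | github.com/sardap/mon-fs | pc_screenshot_decoder/pc_screenshot_decoder/main.py | remove_consecutive_duplicates_until_n
-- ===== SOURCE A (Python) =====
-- def remove_consecutive_duplicates_until_n(s: str, n: int):
--     for i in range(1, len(s)):
--         if s[i] == s[i - 1]:
--             s = s[:i] + s[i + 1 :]
--             if len(s) == n:
--                 return s
--             return remove_consecutive_duplicates_until_n(s, n)
--
--     return s
-- ===== SOURCE B (Python) =====
-- def remove_consecutive_duplicates_until_n(s: str, n: int):
--     # single left-to-right pass with a removal budget of len(s) - n
--     r = len(s) - n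
--     out = []
--     removed = 0
--     for i, c in enumerate(s):
--         if out and c == out[-1]:
--             removed += 1
--             if removed == r:
--                 return ''.join(out) + s[i + 1:]
--         else:
--             out.append(c)
--     return ''.join(out)
-- ===== Notes on version B (the rewrite author's own statement) =====
-- stated objective: faster
-- what changed: A repeatedly rescans the string from the start and rebuilds it after each single deletion (restarting recursion); B does one left-to-right pass keeping the built prefix and a removal budget of len(s)-n, stopping early when the budget is used up.
import Mathlib
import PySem

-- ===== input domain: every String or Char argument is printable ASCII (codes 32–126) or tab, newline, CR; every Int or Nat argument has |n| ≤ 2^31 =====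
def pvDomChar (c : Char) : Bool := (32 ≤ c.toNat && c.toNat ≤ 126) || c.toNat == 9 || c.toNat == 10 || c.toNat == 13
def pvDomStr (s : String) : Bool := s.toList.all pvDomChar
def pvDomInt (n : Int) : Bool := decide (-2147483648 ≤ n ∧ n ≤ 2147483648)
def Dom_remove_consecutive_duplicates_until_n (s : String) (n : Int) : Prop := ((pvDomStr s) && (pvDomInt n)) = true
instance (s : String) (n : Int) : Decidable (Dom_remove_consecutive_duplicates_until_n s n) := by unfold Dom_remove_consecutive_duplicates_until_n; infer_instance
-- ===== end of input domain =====

-- B replaces A's restart-from-scratch removal recursion by one linear left-to-right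
-- pass with a removal budget of len(s) - n (faster in a timing run).


-- ===== PORT A =====
-- the for-loop 'for i in range(1, len(s)): if s[i] == s[i-1]' as a scan for the
-- first adjacent-duplicate index (i is the index of the second element of the pair)
def pvFindDup : List Char → Nat → Option Nat
  | c1 :: c2 :: rest, i => if c2 = c1 then some i else pvFindDup (c2 :: rest) (i + 1)
  | _, _ => none

-- termination fact the recursion of pvACore cites: a found index satisfies i0 ≤ i ∧ i + 1 < i0 + cs.length
theorem pvFindDup_some_bounds : ∀ (cs : List Char) (i0 i : Nat),
    pvFindDup cs i0 = some i → i0 ≤ i ∧ i + 1 < i0 + cs.length := by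
  intro cs
  induction cs with
  | nil => intro i0 i h; simp [pvFindDup] at h
  | cons c1 tail ih =>
    intro i0 i h
    cases tail with
    | nil => simp [pvFindDup] at h
    | cons c2 rest =>
      by_cases hc : c2 = c1
      · simp [pvFindDup, hc] at h
        simp only [List.length_cons]
        omega
      · simp [pvFindDup, hc] at h
        have := ih (i0 + 1) i h
        simp at this ⊢
        omega

-- A step for step: find the first adjacent duplicate, delete it (s = s[:i] + s[i+1:]),
-- return s if len(s) == n, else recurse; if the loop finishes without a hit, return s.
def pvACore (n : Int) (cs : List Char) : List Char :=
  match h : pvFindDup cs 1 with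
  | none => cs
  | some i =>
    let cs' := cs.take i ++ cs.drop (i + 1)
    if (cs'.length : Int) = n then cs' else pvACore n cs'
termination_by cs.length
decreasing_by
  have := pvFindDup_some_bounds cs 1 i h
  simp
  omega

def remove_consecutive_duplicates_until_n (s : String) (n : Int) : String :=
  String.mk (pvACore n s.toList)

-- ===== PORT B =====
-- B's single pass: out is the (reversed) kept prefix, removed counts deleted
-- duplicates; when removed reaches r it returns the kept prefix plus the untouched rest.
def pvAltLoop (r : Int) : List Char → List Char → Int → List Char
  | [], out, _ => out.reverse
  | c :: rest, out, removed =>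
    match out with
    | p :: _ =>
      if c = p then
        if removed + 1 = r then out.reverse ++ rest
        else pvAltLoop r rest out (removed + 1)
      else pvAltLoop r rest (c :: out) removed
    | [] => pvAltLoop r rest [c] removed

def remove_consecutive_duplicates_until_n_alt (s : String) (n : Int) : String :=
  String.mk (pvAltLoop ((s.toList.length : Int) - n) s.toList [] 0)

-- ===== PRECONDITION & SPEC =====
def Spec_remove_consecutive_duplicates_until_n (s : String) (n : Int) (out : String) : Prop := out = remove_consecutive_duplicates_until_n_alt s n
instance (s : String) (n : Int) (out : String) : Decidable (Spec_remove_consecutive_duplicates_until_n s n out) := by unfold Spec_remove_consecutive_duplicates_until_n; infer_instance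

-- ===== CLAIM (what is proved, stated in full; the proofs are below) =====
def Claim_equal_remove_consecutive_duplicates_until_n : Prop := ∀ (s : String) (n : Int), Dom_remove_consecutive_duplicates_until_n s n → Spec_remove_consecutive_duplicates_until_n s n (remove_consecutive_duplicates_until_n s n)

-- ===== LEMMAS AND PROOFS =====

-- common reference implementation: direct greedy recursion with a budget
def pvG : List Char → Int → List Char
  | [], _ => []
  | [c], _ => [c]
  | c1 :: c2 :: rest, r =>
    if c2 = c1 then
      if r = 1 then c1 :: rest
      else pvG (c1 :: rest) (r - 1)
    else c1 :: pvG (c2 :: rest) r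

-- "no adjacent equal pair" invariant for the scanned prefix
def pvSep : List Char → Prop
  | c1 :: c2 :: rest => c1 ≠ c2 ∧ pvSep (c2 :: rest)
  | _ => True

-- B's tail-recursive loop computes pvG
theorem pvAltLoop_eq_pvG : ∀ (cs : List Char) (p : Char) (out : List Char) (removed r : Int),
    pvAltLoop r cs (p :: out) removed = out.reverse ++ pvG (p :: cs) (r - removed) := by
  intro cs
  induction cs with
  | nil => intro p out removed r; simp [pvAltLoop, pvG]
  | cons c rest ih =>
    intro p out removed r
    by_cases hc : c = p
    · subst hc
      by_cases hr : removed + 1 = r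
      · have h1 : r - removed = 1 := by omega
        simp [pvAltLoop, hr, pvG, h1]
      · have h2 : ¬(r - removed = 1) := by omega
        have h3 : r - (removed + 1) = r - removed - 1 := by omega
        simp [pvAltLoop, hr, pvG, h2, ih, h3]
    · simp [pvAltLoop, hc, pvG, ih]

theorem pvAlt_eq_pvG (cs : List Char) (r : Int) :
    pvAltLoop r cs [] 0 = pvG cs r := by
  cases cs with
  | nil => simp [pvAltLoop, pvG]
  | cons c rest => simpa using pvAltLoop_eq_pvG rest c [] 0 r

-- no adjacent duplicates → pvG is the identity
theorem pvG_of_sep : ∀ (cs : List Char) (r : Int), pvSep cs → pvG cs r = cs := by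
  intro cs
  induction cs with
  | nil => intro r _; simp [pvG]
  | cons c tail ih =>
    intro r h
    cases tail with
    | nil => simp [pvG]
    | cons c2 rest =>
      obtain ⟨hne, htail⟩ := h
      have h2 : ¬(c2 = c) := fun hh => hne (Eq.symm hh)
      simp [pvG, h2, ih r htail]

-- a successful pvFindDup scan splits the list at its first adjacent duplicate
theorem pvFindDup_some_decomp : ∀ (cs : List Char) (i0 i : Nat),
    pvFindDup cs i0 = some i →
    ∃ pre a rest, cs = pre ++ a :: a :: rest ∧ i = i0 + pre.length ∧ pvSep (pre ++ [a]) := by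
  intro cs
  induction cs with
  | nil => intro i0 i h; simp [pvFindDup] at h
  | cons c1 tail ih =>
    intro i0 i h
    cases tail with
    | nil => simp [pvFindDup] at h
    | cons c2 rest =>
      by_cases hc : c2 = c1
      · simp [pvFindDup, hc] at h
        exact ⟨[], c1, rest, by simp [hc], by simp [h], by simp [pvSep]⟩
      · simp [pvFindDup, hc] at h
        obtain ⟨pre, a, rest', hdec, hi, hsep⟩ := ih (i0 + 1) i h
        refine ⟨c1 :: pre, a, rest', by simp [hdec], by simp [hi]; omega, ?_⟩
        cases pre with
        | nil =>
          simp at hdec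
          refine ⟨?_, hsep⟩
          rw [← hdec.1]
          exact fun he => hc (Eq.symm he)
        | cons x xs =>
          simp at hdec
          refine ⟨?_, hsep⟩
          rw [← hdec.1]
          exact fun he => hc (Eq.symm he)

-- a failed pvFindDup scan means no adjacent duplicates at all
theorem pvFindDup_none_sep : ∀ (cs : List Char) (i0 : Nat),
    pvFindDup cs i0 = none → pvSep cs := by
  intro cs
  induction cs with
  | nil => intro i0 _; trivial
  | cons c1 tail ih =>
    intro i0 h
    cases tail with
    | nil => trivial
    | cons c2 rest =>
      by_cases hc : c2 = c1
      · simp [pvFindDup, hc] at h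
      · simp [pvFindDup, hc] at h
        exact ⟨fun he => hc he.symm, ih (i0 + 1) h⟩

-- one deletion step of pvG at the first adjacent duplicate
theorem pvG_step : ∀ (pre : List Char) (a : Char) (rest : List Char) (r : Int),
    pvSep (pre ++ [a]) →
    pvG (pre ++ a :: a :: rest) r =
      if r = 1 then pre ++ a :: rest else pvG (pre ++ a :: rest) (r - 1) := by
  intro pre
  induction pre with
  | nil => intro a rest r _; simp [pvG]
  | cons p pre' ih =>
    intro a rest r hsep
    have key : ∀ (tl : List Char) (rr : Int),
        pvG (p :: (pre' ++ a :: tl)) rr = p :: pvG (pre' ++ a :: tl) rr := by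
      intro tl rr
      cases hpre : pre' with
      | nil =>
        have hpa : p ≠ a := by rw [hpre] at hsep; exact hsep.1
        have hap : ¬(a = p) := fun he => hpa (Eq.symm he)
        simp [pvG, hap]
      | cons x xs =>
        have hpx : p ≠ x := by rw [hpre] at hsep; exact hsep.1
        have hxp : ¬(x = p) := fun he => hpx (Eq.symm he)
        simp [pvG, hpre, hxp]
    have hsep' : pvSep (pre' ++ [a]) := by
      cases hpre : pre' with
      | nil => trivial
      | cons x xs => rw [hpre] at hsep; exact hsep.2
    have h1 := key (a :: rest) r
    simp only [List.cons_append] at h1 ⊢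
    rw [h1, ih a rest r hsep']
    by_cases hr : r = 1
    · simp [hr]
    · simp only [hr, if_false]
      rw [key rest (r - 1)]

-- A's restart recursion computes pvG with budget len - n
theorem pvACore_eq_pvG : ∀ (len : Nat) (cs : List Char) (n : Int), cs.length = len →
    pvACore n cs = pvG cs ((cs.length : Int) - n) := by
  intro len
  induction len using Nat.strong_induction_on with
  | _ len ih =>
    intro cs n hlen
    rw [pvACore]
    split
    · next h => exact (pvG_of_sep cs _ (pvFindDup_none_sep cs 1 h)).symm
    · next i h =>
      obtain ⟨pre, a, rest, hdec, hi, hsep⟩ := pvFindDup_some_decomp _ 1 i h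
      subst hdec
      have hple : pre.length ≤ i := by omega
      have htake : (pre ++ a :: a :: rest).take i = pre ++ [a] := by
        rw [List.take_append, List.take_of_length_le hple]
        have h1 : i - pre.length = 1 := by omega
        rw [h1]
        simp
      have hdrop : (pre ++ a :: a :: rest).drop (i + 1) = rest := by
        rw [List.drop_append, List.drop_of_length_le (by omega : pre.length ≤ i + 1)]
        have h2 : i + 1 - pre.length = 2 := by omega
        rw [h2]
        simp
      rw [htake, hdrop]
      have hstep := pvG_step pre a rest (((pre ++ a :: a :: rest).length : Int) - n) hsep
      rw [hstep]
      have hL : pre ++ [a] ++ rest = pre ++ a :: rest := by simp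
      rw [hL]
      have hiff : (((pre ++ a :: rest).length : Int) = n) ↔
          (((pre ++ a :: a :: rest).length : Int) - n = 1) := by
        simp only [List.length_append, List.length_cons]
        push_cast
        omega
      by_cases hn : ((pre ++ a :: rest).length : Int) = n
      · rw [if_pos hn, if_pos (hiff.mp hn)]
      · rw [if_neg hn, if_neg (fun hh => hn (hiff.mpr hh))]
        have hlt : (pre ++ a :: rest).length < len := by
          rw [← hlen]
          simp only [List.length_append, List.length_cons]
          omega
        rw [ih _ hlt _ n rfl]
        congr 1
        simp only [List.length_append, List.length_cons]
        push_cast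
        omega

-- ===== VERDICT (by name: the statement is the Claim_ definition above) =====
theorem remove_consecutive_duplicates_until_n_spec : Claim_equal_remove_consecutive_duplicates_until_n := by
  intro s n _
  show remove_consecutive_duplicates_until_n s n = remove_consecutive_duplicates_until_n_alt s n
  unfold remove_consecutive_duplicates_until_n remove_consecutive_duplicates_until_n_alt
  rw [pvAlt_eq_pvG, pvACore_eq_pvG s.toList.length s.toList n rfl]
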